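-- pv_equiv track=rewrite | github.com/RomainPierre7/Advent-of-Code | 2023/day13/13_1.py | horizontal_reflection
-- ===== SOURCE A (Python) =====
-- def horizontal_reflection(pattern):
--     n = len(pattern)
--     is_horizontal = False
--     for i in range(n-1):
--         top = i
--         bot = i + 1
--         while top >= 0 and bot < n:
--             if pattern[top] == pattern[bot]:
--                 is_horizontal = True
--             else:
--                 is_horizontal = False
--                 break
--             top -= 1
--             bot += 1
--         if is_horizontal:
--             return True, 100 * (i+1)
--     return False, 0
-- ===== SOURCE B (Python) =====
-- def horizontal_reflection(pattern):
--     n = len(pattern)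
--     for i in range(1, n):
--         if pattern[i-1] != pattern[i]:
--             continue
--         k = min(i, n - i)
--         if pattern[i-k:i][::-1] == pattern[i:i+k]:
--             return True, 100 * i
--     return False, 0
-- ===== Notes on version B (the rewrite author's own statement) =====
-- stated objective: alternative
-- what changed: Replaces A's hand-rolled two-pointer expand-around-center inner while loop carrying a boolean flag by an adjacent-row pre-check followed by a direct comparison of the reversed top slice with the bottom slice at each candidate mirror line.
import Mathlib
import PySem

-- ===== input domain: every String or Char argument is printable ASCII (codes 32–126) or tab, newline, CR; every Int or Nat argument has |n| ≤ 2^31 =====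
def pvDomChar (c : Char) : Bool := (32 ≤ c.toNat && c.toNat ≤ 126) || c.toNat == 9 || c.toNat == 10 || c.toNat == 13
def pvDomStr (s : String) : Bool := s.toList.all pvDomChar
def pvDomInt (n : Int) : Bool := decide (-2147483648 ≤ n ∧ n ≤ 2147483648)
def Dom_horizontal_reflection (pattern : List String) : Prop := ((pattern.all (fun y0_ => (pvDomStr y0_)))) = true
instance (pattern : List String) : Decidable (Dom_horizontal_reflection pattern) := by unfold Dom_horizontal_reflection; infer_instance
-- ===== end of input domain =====

-- B replaces A's two-pointer expand-around-center while loop (carrying a boolean flag)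
-- by a direct reversed-slice vs slice comparison at each candidate mirror line; same cost.


-- ===== PORT A =====
-- inner 'while top >= 0 and bot < n' loop; inside the loop both indices are in range
-- (guaranteed by the guard), so pyGetD with a default is exact for pattern[top]/pattern[bot]
def loopA (pattern : List String) (top bot : Int) (flag : Bool) : Bool :=
  if 0 ≤ top ∧ bot < (pattern.length : Int) then
    if PySem.List.pyGetD pattern top "" = PySem.List.pyGetD pattern bot "" then
      loopA pattern (top - 1) (bot + 1) true
    else false
  else flag
termination_by ((pattern.length : Int) - bot).toNat
decreasing_by omega

-- outer 'for i in range(n-1)' loop with early return; the flag threads through iterations as in A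
def outerA (pattern : List String) (i : Nat) (flag : Bool) : Bool × Int :=
  if h : (i : Int) < (pattern.length : Int) - 1 then
    let f := loopA pattern i (i + 1) flag
    if f then (true, 100 * ((i : Int) + 1)) else outerA pattern (i + 1) f
  else (false, 0)
termination_by pattern.length - i
decreasing_by omega

def horizontal_reflection (pattern : List String) : Bool × Int :=
  outerA pattern 0 false

-- ===== PORT B =====
-- 'for i in range(1, n): if pattern[i-1] != pattern[i]: continue; k = min(i, n-i); if pattern[i-k:i][::-1] == pattern[i:i+k]: return True, 100*i'
-- scanB is only ever called with 1 ≤ i, so both indices of the pre-check are in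
-- range and pyGetD with a default is exact for pattern[i-1]/pattern[i]
def scanB (pattern : List String) (i : Nat) : Bool × Int :=
  if h : i < pattern.length then
    if PySem.List.pyGetD pattern ((i : Int) - 1) "" ≠ PySem.List.pyGetD pattern (i : Int) "" then
      scanB pattern (i + 1)
    else
      let k : Nat := min i (pattern.length - i)
      if (PySem.List.slice pattern (some ((i : Int) - k)) (some (i : Int))).reverse
          = PySem.List.slice pattern (some (i : Int)) (some ((i : Int) + k)) then
        (true, 100 * (i : Int))
      else scanB pattern (i + 1)
  else (false, 0)
termination_by pattern.length - i
decreasing_by all_goals omega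

def horizontal_reflection_alt (pattern : List String) : Bool × Int :=
  scanB pattern 1

-- ===== PRECONDITION & SPEC =====
def Spec_horizontal_reflection (pattern : List String) (out : Bool × Int) : Prop := out = horizontal_reflection_alt pattern
instance (pattern : List String) (out : Bool × Int) : Decidable (Spec_horizontal_reflection pattern out) := by unfold Spec_horizontal_reflection; infer_instance

-- ===== CLAIM (what is proved, stated in full; the proofs are below) =====
def Claim_equal_horizontal_reflection : Prop := ∀ (pattern : List String), Dom_horizontal_reflection pattern → Spec_horizontal_reflection pattern (horizontal_reflection pattern)

-- ===== LEMMAS AND PROOFS =====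

-- common characterisation: run down two lists comparing heads
def eqRun : List String → List String → Bool
  | a :: as, b :: bs => if a = b then eqRun as bs else false
  | _, _ => true

theorem eqRun_nil_right (u : List String) : eqRun u [] = true := by
  cases u <;> rfl

theorem eqRun_eq_take (u v : List String) :
    eqRun u v = decide (u.take v.length = v.take u.length) := by
  induction u generalizing v with
  | nil => cases v <;> simp [eqRun]
  | cons a as ih =>
    cases v with
    | nil => simp [eqRun]
    | cons b bs =>
      simp only [eqRun, List.length_cons, List.take_succ_cons]
      by_cases h : a = b <;> simp [h, ih]

theorem loopA_eq (pattern : List String) :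
    ∀ m (top bot : Int) (flag : Bool),
      (pattern.length - bot.toNat) = m → 0 ≤ top → top < (pattern.length : Int) →
      0 ≤ bot → bot < (pattern.length : Int) →
      loopA pattern top bot flag
        = eqRun ((pattern.take (top.toNat + 1)).reverse) (pattern.drop bot.toNat) := by
  intro m
  induction m with
  | zero => intro top bot flag hm h0 h1 h2 h3; omega
  | succ m ih =>
    intro top bot flag hm h0 h1 h2 h3
    have htn : top.toNat < pattern.length := by omega
    have hbn : bot.toNat < pattern.length := by omega
    rw [loopA]
    simp only [if_pos (by omega : 0 ≤ top ∧ bot < (pattern.length : Int))]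
    rw [PySem.List.pyGetD_eq_getElem pattern "" h0 h1,
        PySem.List.pyGetD_eq_getElem pattern "" h2 h3]
    have hrev : (pattern.take (top.toNat + 1)).reverse
        = pattern[top.toNat] :: (pattern.take top.toNat).reverse := by
      rw [List.take_add_one]
      simp [List.getElem?_eq_getElem htn]
    have hdrop : pattern.drop bot.toNat
        = pattern[bot.toNat] :: pattern.drop (bot.toNat + 1) := by
      exact (List.drop_eq_getElem_cons hbn)
    rw [hrev, hdrop]
    by_cases heq : pattern[top.toNat] = pattern[bot.toNat]
    · simp only [heq, eqRun]
      by_cases hstop : 0 ≤ top - 1 ∧ bot + 1 < (pattern.length : Int)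
      · have hih := ih (top - 1) (bot + 1) true (by omega) hstop.1 (by omega) (by omega) hstop.2
        rw [hih]
        have e1 : (top - 1).toNat + 1 = top.toNat := by omega
        have e2 : (bot + 1).toNat = bot.toNat + 1 := by omega
        rw [e1, e2]
      · rw [loopA, if_neg hstop]
        rcases (not_and_or.mp hstop) with h | h
        · have e : top.toNat = 0 := by omega
          simp [e, eqRun]
        · have e : pattern.drop (bot.toNat + 1) = [] := by
            apply List.drop_eq_nil_of_le; omega
          rw [e, eqRun_nil_right]
    · simp [heq, eqRun]

-- the slice comparison B makes at line i equals eqRun of reversed prefix and suffix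
theorem sliceEq_iff (pattern : List String) (i : Nat) (hi : i < pattern.length) :
    ((PySem.List.slice pattern (some (((i : Int)) - (min i (pattern.length - i) : Nat)))
        (some (i : Int))).reverse
      = PySem.List.slice pattern (some (i : Int))
          (some ((i : Int) + (min i (pattern.length - i) : Nat))))
    ↔ eqRun ((pattern.take i).reverse) (pattern.drop i) = true := by
  have hki : min i (pattern.length - i) ≤ i := min_le_left _ _
  have hkn : min i (pattern.length - i) ≤ pattern.length - i := min_le_right _ _
  set k : Nat := min i (pattern.length - i) with hk
  have hlenu : (pattern.take i).length = i := by simp; omega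
  have h1 : PySem.List.slice pattern (some ((i : Int) - (k : Nat))) (some (i : Int))
      = (pattern.drop (i - k)).take k := by
    rw [PySem.List.slice_toNat pattern (by omega) (by omega)]
    have e : ((i : Int) - (k : Nat)).toNat = i - k := by omega
    rw [e, Int.toNat_natCast]
    congr 1
    omega
  have h2 : PySem.List.slice pattern (some (i : Int)) (some ((i : Int) + (k : Nat)))
      = (pattern.drop i).take k := by
    rw [PySem.List.slice_toNat pattern (by omega) (by omega)]
    have e : ((i : Int) + (k : Nat)).toNat = i + k := by omega
    rw [e, Int.toNat_natCast]
    congr 1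
    omega
  have h3 : ((pattern.take i).reverse).take k = ((pattern.drop (i - k)).take k).reverse := by
    rw [List.take_reverse, hlenu, List.drop_take]
    have e : i - (i - k) = k := by omega
    rw [e]
  rw [h1, h2, ← h3, eqRun_eq_take]
  simp only [decide_eq_true_eq]
  have hlu : ((pattern.take i).reverse).length = i := by simp; omega
  have hlv : (pattern.drop i).length = pattern.length - i := by simp
  have e1 : ((pattern.take i).reverse).take (pattern.drop i).length
      = ((pattern.take i).reverse).take k := by
    rw [List.take_eq_take_iff, hlu, hlv]
    omega
  have e2 : (pattern.drop i).take ((pattern.take i).reverse).length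
      = (pattern.drop i).take k := by
    rw [List.take_eq_take_iff, hlu, hlv]
    omega
  rw [e1, e2]

theorem outer_eq (pattern : List String) :
    ∀ m (i : Nat) (flag : Bool), pattern.length - i = m →
      outerA pattern i flag = scanB pattern (i + 1) := by
  intro m
  induction m with
  | zero =>
    intro i flag hm
    rw [outerA, scanB,
        dif_neg (by omega : ¬ ((i : Int) < (pattern.length : Int) - 1)),
        dif_neg (by omega : ¬ (i + 1 < pattern.length))]
  | succ m ih =>
    intro i flag hm
    rw [outerA, scanB]
    by_cases hg : (i : Int) < (pattern.length : Int) - 1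
    · simp only [dif_pos hg, dif_pos (by omega : i + 1 < pattern.length)]
      have hin : i < pattern.length := by omega
      have hin1 : i + 1 < pattern.length := by omega
      have hA := loopA_eq pattern (pattern.length - ((i : Int) + 1).toNat) i ((i : Int) + 1) flag
        rfl (by omega) (by omega) (by omega) (by omega)
      simp only [Int.toNat_natCast] at hA
      have ec : ((i : Int) + 1).toNat = i + 1 := by omega
      rw [ec] at hA
      have hB := sliceEq_iff pattern (i + 1) (by omega)
      rw [hA]
      -- the adjacent-row pre-check of B reads pattern[i] and pattern[i+1]
      have hg1 : PySem.List.pyGetD pattern (((i + 1 : Nat) : Int) - 1) "" = pattern[i] := by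
        have e : ((i + 1 : Nat) : Int) - 1 = ((i : Nat) : Int) := by push_cast; ring
        rw [e, PySem.List.pyGetD_eq_getElem pattern "" (by omega) (by omega)]
        simp
      have hg2 : PySem.List.pyGetD pattern ((i + 1 : Nat) : Int) "" = pattern[i + 1] := by
        rw [PySem.List.pyGetD_eq_getElem pattern "" (by omega) (by omega)]
        simp
      have hrev : (pattern.take (i + 1)).reverse
          = pattern[i] :: (pattern.take i).reverse := by
        rw [List.take_add_one]
        simp [List.getElem?_eq_getElem hin]
      have hdrop : pattern.drop (i + 1)
          = pattern[i + 1] :: pattern.drop (i + 2) := by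
        exact (List.drop_eq_getElem_cons hin1)
      rw [hg1, hg2]
      by_cases hne : pattern[i] = pattern[i + 1]
      · rw [if_neg (not_not_intro hne)]
        by_cases hm2 : eqRun ((pattern.take (i + 1)).reverse) (pattern.drop (i + 1)) = true
        · rw [if_pos hm2, if_pos (hB.mpr hm2)]
          simp only [Prod.mk.injEq, true_and]
          push_cast
          ring
        · rw [if_neg hm2, if_neg (fun h => hm2 (hB.mp h))]
          exact ih (i + 1) _ (by omega)
      · have hfalse : eqRun ((pattern.take (i + 1)).reverse) (pattern.drop (i + 1)) = false := by
          rw [hrev, hdrop]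
          simp [eqRun, hne]
        rw [hfalse, if_pos hne]
        simp only [Bool.false_eq_true, if_false]
        exact ih (i + 1) _ (by omega)
    · rw [dif_neg hg, dif_neg (by omega : ¬ (i + 1 < pattern.length))]

-- ===== VERDICT (by name: the statement is the Claim_ definition above) =====
theorem horizontal_reflection_spec : Claim_equal_horizontal_reflection := by
  intro pattern _
  unfold Spec_horizontal_reflection horizontal_reflection horizontal_reflection_alt
  exact outer_eq pattern (pattern.length - 0) 0 false rfl
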